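-- pv_equiv track=rewrite | github.com/reinhardtsean/Python-HW-Examples | project7_fifteen_game_solver.py | zone4
-- ===== SOURCE A (Python) =====
-- def zone4(zero_pos, c_pos):
--     """
--     Zone 4 Helper Function
--     """
--     moves = ''
--     # move zero tile up to same row
--     over1 = zero_pos[0] - c_pos[0]
--     for dummy_o in range(over1):
--         moves += 'u'
--     over2 = zero_pos[1] - c_pos[1]
--     for dummy_o in range(over2):
--         moves += 'l'
--     over2 -= 1
--     # Pull the target tile into the same column as the zero
--     while over2 > 0:
--         if c_pos[0] == 0:
--             moves += 'drrul'
--         else: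
--             moves += 'urrdl'
--         over2 -= 1
--
--     return moves
-- ===== SOURCE B (Python) =====
-- def zone4(zero_pos, c_pos):
--     """Zone 4 helper: compute each output character directly from its index."""
--     dr = max(zero_pos[0] - c_pos[0], 0)
--     dc = max(zero_pos[1] - c_pos[1], 0)
--     cyc = max(zero_pos[1] - c_pos[1] - 1, 0)
--     cycle = 'drrul' if c_pos[0] == 0 else 'urrdl'
--
--     def ch(i):
--         if i < dr:
--             return 'u'
--         if i < dr + dc:
--             return 'l'
--         return cycle[(i - dr - dc) % 5]
--
--     return ''.join(ch(i) for i in range(dr + dc + 5 * cyc))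
-- ===== Notes on version B (the rewrite author's own statement) =====
-- stated objective: alternative
-- what changed: Instead of A's three sequential emitting loops (append 'u', append 'l', then a count-down while appending a 5-char cycle), B computes the output's total length and derives each character directly from its index with a closed-form position-to-character function (thresholds for the 'u' and 'l' runs, then cycle[(i-dr-dc)%5]), joined in one generator pass.
import Mathlib
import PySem

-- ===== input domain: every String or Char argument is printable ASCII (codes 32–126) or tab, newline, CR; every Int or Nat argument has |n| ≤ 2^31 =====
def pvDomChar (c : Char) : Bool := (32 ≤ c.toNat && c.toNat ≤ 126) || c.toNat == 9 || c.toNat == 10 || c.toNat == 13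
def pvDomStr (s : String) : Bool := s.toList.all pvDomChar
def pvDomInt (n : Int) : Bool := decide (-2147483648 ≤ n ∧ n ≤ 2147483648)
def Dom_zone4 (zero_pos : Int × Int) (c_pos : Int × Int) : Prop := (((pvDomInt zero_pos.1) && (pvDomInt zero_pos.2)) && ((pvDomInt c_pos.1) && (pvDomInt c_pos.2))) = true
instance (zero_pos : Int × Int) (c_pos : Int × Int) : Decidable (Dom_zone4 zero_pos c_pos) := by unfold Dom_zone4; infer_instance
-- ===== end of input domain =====

-- B builds the move string by computing each output character directly from its index
-- (closed-form position → character function) instead of A's appending loops (alternative).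

-- ===== PORT A =====
-- the while-loop of A: while over2 > 0: moves += step; over2 -= 1
def zone4While (step : List Char) (moves : List Char) (over2 : Int) : List Char :=
  if h : 0 < over2 then zone4While step (moves ++ step) (over2 - 1) else moves
termination_by over2.toNat
decreasing_by omega

def zone4 (zero_pos : Int × Int) (c_pos : Int × Int) : String :=
  let moves : List Char := []
  let over1 := zero_pos.1 - c_pos.1
  let moves := (PySem.List.pyRange 0 over1 1).foldl (fun m _ => m ++ ['u']) moves
  let over2 := zero_pos.2 - c_pos.2
  let moves := (PySem.List.pyRange 0 over2 1).foldl (fun m _ => m ++ ['l']) moves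
  let step : List Char := if c_pos.1 = 0 then "drrul".toList else "urrdl".toList
  String.ofList (zone4While step moves (over2 - 1))

-- ===== PORT B =====
-- Source B's inner ch(i): cycle[(i-dr-dc) % 5] is in range whenever used (getD's default is never read)
def zone4Ch (cycle : List Char) (dr dc : Int) (i : Int) : Char :=
  if i < dr then 'u'
  else if i < dr + dc then 'l'
  else cycle.getD (PySem.Int.mod (i - dr - dc) 5).toNat ' '

def zone4_alt (zero_pos : Int × Int) (c_pos : Int × Int) : String :=
  let dr := max (zero_pos.1 - c_pos.1) 0
  let dc := max (zero_pos.2 - c_pos.2) 0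
  let cyc := max (zero_pos.2 - c_pos.2 - 1) 0
  let cycle : List Char := if c_pos.1 = 0 then "drrul".toList else "urrdl".toList
  String.ofList ((PySem.List.pyRange 0 (dr + dc + 5 * cyc) 1).map (zone4Ch cycle dr dc))

-- ===== PRECONDITION & SPEC =====
def Spec_zone4 (zero_pos : Int × Int) (c_pos : Int × Int) (out : String) : Prop := out = zone4_alt zero_pos c_pos
instance (zero_pos : Int × Int) (c_pos : Int × Int) (out : String) : Decidable (Spec_zone4 zero_pos c_pos out) := by unfold Spec_zone4; infer_instance

-- ===== CLAIM (what is proved, stated in full; the proofs are below) =====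
def Claim_equal_zone4 : Prop := ∀ (zero_pos : Int × Int) (c_pos : Int × Int), Dom_zone4 zero_pos c_pos → Spec_zone4 zero_pos c_pos (zone4 zero_pos c_pos)

-- ===== LEMMAS AND PROOFS =====

theorem foldl_append_const (s : List Char) (l : List Int) (m : List Char) :
    l.foldl (fun acc _ => acc ++ s) m = m ++ (List.replicate l.length s).flatten := by
  induction l generalizing m with
  | nil => simp
  | cons a t ih => simp [List.foldl, ih, List.replicate_succ]

-- s * n (n ≤ 0 → empty), the value zone4While accumulates
def strMul (s : List Char) (n : Int) : List Char := (List.replicate n.toNat s).flatten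

theorem strMul_pos (s : List Char) (n : Int) (hn : 0 < n) :
    strMul s n = s ++ strMul s (n - 1) := by
  have h : n.toNat = (n - 1).toNat + 1 := by omega
  unfold strMul
  rw [h, List.replicate_succ, List.flatten_cons]

theorem zone4While_eq (step m : List Char) (n : Int) :
    zone4While step m n = m ++ strMul step n := by
  generalize hk : n.toNat = k
  induction k generalizing m n with
  | zero =>
    rw [zone4While]
    have : ¬ 0 < n := by omega
    simp [this, strMul, show n.toNat = 0 from hk]
  | succ k ih =>
    rw [zone4While]
    have hn : 0 < n := by omega
    have h2 : (n - 1).toNat = k := by omega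
    rw [dif_pos hn, ih _ _ h2, strMul_pos step n hn, List.append_assoc]

theorem flat5_getD (a b c d e : Char) (n m : Nat) (hm : m < n * 5) :
    (List.replicate n [a, b, c, d, e]).flatten.getD m ' '
      = [a, b, c, d, e].getD (m % 5) ' ' := by
  induction n generalizing m with
  | zero => omega
  | succ k ih =>
    rw [List.replicate_succ, List.flatten_cons]
    by_cases h5 : m < 5
    · rw [List.getD_append _ _ _ _ (by simp [h5])]
      have : m % 5 = m := Nat.mod_eq_of_lt h5
      rw [this]
    · have hm' : m - 5 < k * 5 := by omega
      have hlen : ([a, b, c, d, e] : List Char).length = 5 := by simp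
      rw [List.getD_eq_getElem?_getD, List.getElem?_append_right (by simp; omega),
        ← List.getD_eq_getElem?_getD, hlen, ih _ hm']
      congr 1
      omega

theorem bmap (a b c d e : Char) (u l n : Nat) :
    (PySem.List.pyRange 0 ((u : Int) + l + 5 * n) 1).map (zone4Ch [a, b, c, d, e] u l)
      = List.replicate u 'u' ++ List.replicate l 'l'
        ++ (List.replicate n [a, b, c, d, e]).flatten := by
  have hlenflat : ((List.replicate n [a, b, c, d, e]).flatten).length = n * 5 := by
    simp [List.length_flatten]
  apply List.ext_getElem
  · simp [PySem.List.length_pyRange_one, hlenflat]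
    omega
  · intro j hj1 hj2
    have hjlt : j < u + l + n * 5 := by
      simp [PySem.List.length_pyRange_one] at hj1
      omega
    rw [List.getElem_map, PySem.List.getElem_pyRange_one, zero_add]
    unfold zone4Ch
    by_cases hu : j < u
    · rw [if_pos (by exact_mod_cast hu)]
      rw [List.getElem_append_left (by simp; omega),
        List.getElem_append_left (by simpa using hu), List.getElem_replicate]
    · rw [if_neg (by exact_mod_cast hu)]
      by_cases hl : j < u + l
      · rw [if_pos (by exact_mod_cast hl)]
        rw [List.getElem_append_left (by simp; omega)]
        rw [List.getElem_append_right (by simp; omega)]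
        simp
      · rw [if_neg (by exact_mod_cast hl)]
        rw [List.getElem_append_right (by simp; omega)]
        have hsub : ((j : Int) - u - l) = ((j - u - l : Nat) : Int) := by
          omega
        have hmod : PySem.Int.mod ((j - u - l : Nat) : Int) 5 = (((j - u - l) % 5 : Nat) : Int) :=
          by exact_mod_cast PySem.Int.mod_natCast (j - u - l) 5
        rw [hsub, hmod]
        simp only [Int.toNat_natCast]
        have hm : j - u - l < n * 5 := by omega
        have := flat5_getD a b c d e n (j - u - l) hm
        rw [List.getD_eq_getElem?_getD, List.getElem?_eq_getElem (by omega : j - u - l < _)] at this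
        · have hidx : j - (u + l) = j - u - l := by omega
          simp only [List.length_append, List.length_replicate, hidx]
          simpa using this.symm

theorem zone4_eq_alt (zp cp : Int × Int) : zone4 zp cp = zone4_alt zp cp := by
  unfold zone4 zone4_alt
  simp only [foldl_append_const, zone4While_eq, List.nil_append, PySem.List.length_pyRange_one]
  set d1 := zp.1 - cp.1 with hd1
  set d2 := zp.2 - cp.2 with hd2
  set cycle : List Char := if cp.1 = 0 then "drrul".toList else "urrdl".toList with hcy
  have hbound : max d1 0 + max d2 0 + 5 * max (d2 - 1) 0
      = ((d1.toNat : Int) + (d2.toNat : Int) + 5 * ((d2 - 1).toNat : Int)) := by omega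
  have hdr : max d1 0 = ((d1.toNat : Int)) := by omega
  have hdc : max d2 0 = ((d2.toNat : Int)) := by omega
  have hsm : strMul cycle (d2 - 1) = (List.replicate (d2 - 1).toNat cycle).flatten := rfl
  rw [hbound, hdr, hdc, hsm]
  have hb : ∀ (a b c d e : Char), cycle = [a, b, c, d, e] →
      (PySem.List.pyRange 0 ((d1.toNat : Int) + (d2.toNat : Int) + 5 * ((d2 - 1).toNat : Int)) 1).map
          (zone4Ch cycle (d1.toNat : Int) (d2.toNat : Int))
        = List.replicate d1.toNat 'u' ++ List.replicate d2.toNat 'l'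
          ++ (List.replicate (d2 - 1).toNat cycle).flatten := by
    intro a b c d e h
    rw [h]
    exact_mod_cast bmap a b c d e d1.toNat d2.toNat (d2 - 1).toNat
  by_cases hc : cp.1 = 0
  · rw [hb 'd' 'r' 'r' 'u' 'l' (by simp [hcy, hc])]
    simp
  · rw [hb 'u' 'r' 'r' 'd' 'l' (by simp [hcy, hc])]
    simp

-- ===== VERDICT (by name: the statement is the Claim_ definition above) =====
theorem zone4_spec : Claim_equal_zone4 := by
  intro zp cp _
  unfold Spec_zone4
  exact zone4_eq_alt zp cp
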